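-- pv_equiv track=rewrite | github.com/Clerks303/MA-Intelligence-Platform | backend/app/services/data_quality_engine.py | _calculate_overall_trend
-- ===== SOURCE A (Python) =====
-- from typing import Dict, List, Optional, Tuple, Any, Union, Set
--
-- def _calculate_overall_trend(trends_analysis: Dict[str, Any]) -> str:
--     """Calcule la tendance globale"""
--     if not trends_analysis:
--         return 'stable'
--
--     improving_count = sum(1 for data in trends_analysis.values()
--                         if data['trend_direction'] == 'improving')
--     declining_count = sum(1 for data in trends_analysis.values()
--                         if data['trend_direction'] == 'declining')
--
--     if improving_count > declining_count:
--         return 'improving'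
--     elif declining_count > improving_count:
--         return 'declining'
--     else:
--         return 'stable'
-- ===== SOURCE B (Python) =====
-- def _calculate_overall_trend(trends_analysis):
--     """Calcule la tendance globale"""
--     score = 0
--     for data in trends_analysis.values():
--         direction = data['trend_direction']
--         if direction == 'improving':
--             score += 1
--         elif direction == 'declining':
--             score -= 1
--     if score > 0:
--         return 'improving'
--     if score < 0:
--         return 'declining'
--     return 'stable'
-- ===== Notes on version B (the rewrite author's own statement) =====
-- stated objective: alternative
-- what changed: Replaces A's empty-dict guard and two separate filtered counting passes by a single pass maintaining one signed score (+1 for improving, -1 for declining); the result is the sign of that score, so no counts are ever compared.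
import Mathlib
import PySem

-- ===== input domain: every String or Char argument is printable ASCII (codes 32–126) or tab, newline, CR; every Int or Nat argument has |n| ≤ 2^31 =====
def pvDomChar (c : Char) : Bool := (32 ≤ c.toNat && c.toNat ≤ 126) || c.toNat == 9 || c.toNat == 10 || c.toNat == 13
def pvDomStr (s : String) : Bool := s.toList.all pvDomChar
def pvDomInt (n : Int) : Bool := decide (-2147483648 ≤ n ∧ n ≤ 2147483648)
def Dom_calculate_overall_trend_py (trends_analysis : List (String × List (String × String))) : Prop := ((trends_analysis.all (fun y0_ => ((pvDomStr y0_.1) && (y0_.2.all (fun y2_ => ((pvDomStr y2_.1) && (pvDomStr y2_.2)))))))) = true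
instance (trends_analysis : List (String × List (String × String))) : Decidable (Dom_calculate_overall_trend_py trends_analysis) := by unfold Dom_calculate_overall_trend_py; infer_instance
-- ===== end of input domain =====

-- B replaces A's empty-dict guard and two filtered counting passes by one pass keeping a single signed score whose sign decides (alternative decomposition, same cost).


-- ===== PORT A =====
-- data['trend_direction'] : total form of the dict lookup; Pre_ guarantees the key is present,
-- exactly where the Python does not raise KeyError.
def pvTrendDir (data : List (String × String)) : String :=
  ((PySem.Dict.mk data).get? "trend_direction").getD ""

def calculate_overall_trend_py (trends_analysis : List (String × List (String × String))) : String :=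
  if trends_analysis = [] then "stable"
  else
    let improving_count : Int :=
      trends_analysis.foldl (fun acc p => acc + (if pvTrendDir p.2 == "improving" then 1 else 0)) 0
    let declining_count : Int :=
      trends_analysis.foldl (fun acc p => acc + (if pvTrendDir p.2 == "declining" then 1 else 0)) 0
    if improving_count > declining_count then "improving"
    else if declining_count > improving_count then "declining"
    else "stable"

-- ===== PORT B =====
def calculate_overall_trend_py_alt (trends_analysis : List (String × List (String × String))) : String :=
  let score : Int :=
    trends_analysis.foldl
      (fun score p =>
        let direction := pvTrendDir p.2
        if direction == "improving" then score + 1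
        else if direction == "declining" then score - 1
        else score) 0
  if score > 0 then "improving"
  else if score < 0 then "declining"
  else "stable"

-- ===== PRECONDITION & SPEC =====
-- Pre_: every value carries the key 'trend_direction'; where it is missing the Python A raises KeyError.
def Pre_calculate_overall_trend_py (trends_analysis : List (String × List (String × String))) : Prop :=
  ∀ p ∈ trends_analysis, ((PySem.Dict.mk p.2).get? "trend_direction").isSome = true
instance (trends_analysis : List (String × List (String × String))) : Decidable (Pre_calculate_overall_trend_py trends_analysis) := by unfold Pre_calculate_overall_trend_py; infer_instance
def pvWitness_calculate_overall_trend_py : (List (String × List (String × String))) :=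
  [("c1", [("trend_direction", "improving")]), ("c2", [("trend_direction", "stable")])]
def Spec_calculate_overall_trend_py (trends_analysis : List (String × List (String × String))) (out : String) : Prop := out = calculate_overall_trend_py_alt trends_analysis
instance (trends_analysis : List (String × List (String × String))) (out : String) : Decidable (Spec_calculate_overall_trend_py trends_analysis out) := by unfold Spec_calculate_overall_trend_py; infer_instance

-- ===== CLAIM (what is proved, stated in full; the proofs are below) =====
def Claim_equal_calculate_overall_trend_py : Prop := ∀ (trends_analysis : List (String × List (String × String))), Dom_calculate_overall_trend_py trends_analysis → Pre_calculate_overall_trend_py trends_analysis → Spec_calculate_overall_trend_py trends_analysis (calculate_overall_trend_py trends_analysis)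

-- ===== LEMMAS AND PROOFS =====
-- pointwise value of B's loop body as an added increment
def pvInc (p : String × List (String × String)) : Int :=
  if pvTrendDir p.2 == "improving" then 1
  else if pvTrendDir p.2 == "declining" then -1 else 0

-- B's score loop in closed form
theorem pvScoreFold (t : List (String × List (String × String))) (a : Int) :
    t.foldl
      (fun score p =>
        let direction := pvTrendDir p.2
        if direction == "improving" then score + 1
        else if direction == "declining" then score - 1
        else score) a
      = a + (t.map pvInc).sum := by
  induction t generalizing a with
  | nil => simp
  | cons h tl ih =>
    simp only [List.foldl_cons, List.map_cons, List.sum_cons]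
    rw [ih]
    simp only [pvInc]
    by_cases h1 : (pvTrendDir h.2 == "improving") = true <;>
      by_cases h2 : (pvTrendDir h.2 == "declining") = true <;>
        simp [h1, h2] <;> omega

-- the increment sum is the difference of the two indicator sums
theorem pvIncSum (t : List (String × List (String × String))) :
    (t.map pvInc).sum
      = (t.map (fun p => if pvTrendDir p.2 == "improving" then (1 : Int) else 0)).sum
        - (t.map (fun p => if pvTrendDir p.2 == "declining" then (1 : Int) else 0)).sum := by
  induction t with
  | nil => simp
  | cons h tl ih =>
    simp only [List.map_cons, List.sum_cons, ih, pvInc]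
    split_ifs <;> simp_all <;> ring

-- B's signed score equals A's improving count minus A's declining count.
theorem pvScoreEq (t : List (String × List (String × String))) :
    t.foldl
      (fun score p =>
        let direction := pvTrendDir p.2
        if direction == "improving" then score + 1
        else if direction == "declining" then score - 1
        else score) 0
      = t.foldl (fun acc p => acc + (if pvTrendDir p.2 == "improving" then (1 : Int) else 0)) 0
        - t.foldl (fun acc p => acc + (if pvTrendDir p.2 == "declining" then (1 : Int) else 0)) 0 := by
  rw [pvScoreFold, PySem.List.foldl_add, PySem.List.foldl_add, pvIncSum]
  omega

-- sign-of-difference branch equals comparison branch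
theorem pvBranch (i d : Int) :
    (if i > d then "improving" else if d > i then "declining" else "stable")
      = (if i - d > 0 then "improving" else if i - d < 0 then "declining" else "stable") := by
  by_cases h1 : i > d
  · rw [if_pos h1, if_pos (by omega)]
  · by_cases h2 : d > i
    · rw [if_neg h1, if_pos h2, if_neg (by omega), if_pos (by omega)]
    · rw [if_neg h1, if_neg h2, if_neg (by omega), if_neg (by omega)]

-- ===== VERDICT (by name: the statement is the Claim_ definition above) =====
theorem calculate_overall_trend_py_spec : Claim_equal_calculate_overall_trend_py := by
  intro t _ _
  unfold Spec_calculate_overall_trend_py calculate_overall_trend_py calculate_overall_trend_py_alt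
  by_cases ht : t = []
  · subst ht; rfl
  · rw [if_neg ht, pvScoreEq t]
    exact pvBranch _ _
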